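-- pv_equiv track=rewrite | github.com/eliottcassidy2000/math | 04-computation/algebraic_proof_cn3.py | compute_sum_fb
-- ===== SOURCE A (Python) =====
-- from itertools import permutations, combinations
--
-- def compute_sum_fb(A):
--     """Direct computation of sum_P f_P * b_P."""
--     n = len(A)
--     total = 0
--     for p in permutations(range(n)):
--         f = sum(1 for i in range(n-1) if A[p[i]][p[i+1]] == 1)
--         b = n - 1 - f
--         total += f * b
--     return total
-- ===== SOURCE B (Python) =====
-- def compute_sum_fb(A):
--     """Closed-form computation of sum_P f_P * b_P via adjacency-pair counting.
--
--     By linearity, sum_P f_P*(n-1-f_P) = (n-1)*S1 - S2 where S1 = sum_P f_P and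
--     S2 = sum_P f_P^2; both are computed combinatorially from the directed edge
--     set E = {(i,j) : i != j, A[i][j] == 1}:
--       S1 = (n-1)! * m                       (each edge is adjacent in (n-1)! perms)
--       S2 = (n-1)! * m + (n-2)! * (2*c + d)  (c = chains a->b->c, d = disjoint edge pairs)
--     """
--     n = len(A)
--     if n < 2:
--         return 0
--     e = [[1 if i != j and A[i][j] == 1 else 0 for j in range(n)] for i in range(n)]
--     out = [sum(e[i]) for i in range(n)]
--     inc = [sum(e[i][j] for i in range(n)) for j in range(n)]
--     m = sum(out)
--     r = sum(e[i][j] * e[j][i] for i in range(n) for j in range(n))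
--     c = sum(inc[v] * out[v] for v in range(n)) - r
--     d = sum(e[i][j] * (m - out[i] - inc[i] - out[j] - inc[j] + 1 + e[j][i])
--             for i in range(n) for j in range(n))
--     f2 = 1
--     for t in range(2, n - 1):
--         f2 *= t
--     f1 = f2 * (n - 1)
--     return (n - 2) * f1 * m - f2 * (2 * c + d)
-- ===== Notes on version B (the rewrite author's own statement) =====
-- stated objective: faster
-- what changed: A sums f*(n-1-f) over all n! permutations; B evaluates the same total in closed form by linearity over adjacent-edge indicator pairs (counting edges, reciprocal edge pairs and degree sums of the matrix), i.e. (n-2)*(n-1)!*m - (n-2)!*K with K = m^2 - sum(out^2) - sum(in^2) + m - r.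
import Mathlib
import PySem

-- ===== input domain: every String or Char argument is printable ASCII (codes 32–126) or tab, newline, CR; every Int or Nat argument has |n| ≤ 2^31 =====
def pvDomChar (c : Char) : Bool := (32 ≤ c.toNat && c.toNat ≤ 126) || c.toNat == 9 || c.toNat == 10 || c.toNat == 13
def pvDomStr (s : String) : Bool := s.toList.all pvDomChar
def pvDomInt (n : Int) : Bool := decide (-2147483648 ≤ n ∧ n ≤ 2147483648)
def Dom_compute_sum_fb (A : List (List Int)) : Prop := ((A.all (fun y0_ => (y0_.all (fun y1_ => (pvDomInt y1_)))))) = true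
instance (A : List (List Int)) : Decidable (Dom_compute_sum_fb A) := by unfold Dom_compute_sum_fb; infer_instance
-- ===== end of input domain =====

-- B replaces A's O(n!·n) sweep over all permutations by an O(n^2) closed form obtained
-- by linearity of the sum over adjacent-edge indicators (objective: faster, asymptotic).

-- ===== PORT A =====
-- A[i][j] as an Int (total form of Python's indexing; Pre_ excludes the IndexError inputs)
def pvEnt (A : List (List Int)) (i j : Int) : Int :=
  PySem.List.pyGetD (PySem.List.pyGetD A i []) j 0

-- f = sum(1 for i in range(n-1) if A[p[i]][p[i+1]] == 1)
def pvF (A : List (List Int)) (p : List Int) : Int :=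
  ((PySem.List.pyRange 0 ((A.length : Int) - 1) 1).map (fun i =>
    if pvEnt A (PySem.List.pyGetD p i 0) (PySem.List.pyGetD p (i + 1) 0) = 1
    then (1 : Int) else 0)).sum

def compute_sum_fb (A : List (List Int)) : Int :=
  (PySem.List.permutations (PySem.List.pyRange 0 (A.length : Int) 1)
      (PySem.List.pyRange 0 (A.length : Int) 1).length).foldl
    (fun total p => total + pvF A p * ((A.length : Int) - 1 - pvF A p)) 0

-- ===== PORT B =====
-- e(i, j) = 1 if i != j and A[i][j] == 1 else 0
def pvEdge (A : List (List Int)) (i j : Nat) : Int :=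
  if i ≠ j ∧ pvEnt A (i : Int) (j : Int) = 1 then 1 else 0

def compute_sum_fb_alt (A : List (List Int)) : Int :=
  let n := A.length
  if n < 2 then 0
  else
    let out := (List.range n).map (fun i => ((List.range n).map (fun j => pvEdge A i j)).sum)
    let inc := (List.range n).map (fun j => ((List.range n).map (fun i => pvEdge A i j)).sum)
    let m := out.sum
    let r := ((List.range n).map (fun i =>
        ((List.range n).map (fun j => pvEdge A i j * pvEdge A j i)).sum)).sum
    let c := ((List.range n).map (fun v => inc.getD v 0 * out.getD v 0)).sum - r
    let d := ((List.range n).map (fun i => ((List.range n).map (fun j =>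
        pvEdge A i j * (m - out.getD i 0 - inc.getD i 0 - out.getD j 0 - inc.getD j 0
          + 1 + pvEdge A j i))).sum)).sum
    let f2 := (PySem.List.pyRange 2 ((n : Int) - 1) 1).foldl (fun a t => a * t) 1
    let f1 := f2 * ((n : Int) - 1)
    ((n : Int) - 2) * f1 * m - f2 * (2 * c + d)

-- ===== PRECONDITION & SPEC =====
-- Pre_ excludes exactly the inputs where Python A raises IndexError: when n ≥ 2, every
-- permutation makes A[i][j] reachable for every pair i ≠ j below n, so row i must have
-- an entry at every such column j.
def Pre_compute_sum_fb (A : List (List Int)) : Prop :=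
  ∀ i ∈ List.range A.length, ∀ j ∈ List.range A.length, i ≠ j → j < (A.getD i []).length
instance (A : List (List Int)) : Decidable (Pre_compute_sum_fb A) := by
  unfold Pre_compute_sum_fb; infer_instance
def pvWitness_compute_sum_fb : List (List Int) := [[0, 1], [1, 0]]

def Spec_compute_sum_fb (A : List (List Int)) (out : Int) : Prop := out = compute_sum_fb_alt A
instance (A : List (List Int)) (out : Int) : Decidable (Spec_compute_sum_fb A out) := by
  unfold Spec_compute_sum_fb; infer_instance

-- ===== CLAIM (what is proved, stated in full; the proofs are below) =====
def Claim_equal_compute_sum_fb : Prop := ∀ (A : List (List Int)), Dom_compute_sum_fb A → Pre_compute_sum_fb A → Spec_compute_sum_fb A (compute_sum_fb A)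

-- ===== LEMMAS AND PROOFS =====

-- ---- proof-side statistics of the edge indicator over a vertex set ----

-- 0/1 indicator of a directed edge a → b (the quantity A's f sums along a permutation)
def pvChi (A : List (List Int)) (a b : Int) : Int :=
  if a ≠ b ∧ pvEnt A a b = 1 then 1 else 0

def pvOut (A : List (List Int)) (s : Finset Int) (y : Int) : Int := s.sum (fun z => pvChi A y z)
def pvIn  (A : List (List Int)) (s : Finset Int) (y : Int) : Int := s.sum (fun z => pvChi A z y)
def pvM   (A : List (List Int)) (s : Finset Int) : Int := s.sum (fun x => pvOut A s x)
def pvR   (A : List (List Int)) (s : Finset Int) : Int :=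
  s.sum (fun x => s.sum (fun y => pvChi A x y * pvChi A y x))
def pvO2  (A : List (List Int)) (s : Finset Int) : Int := s.sum (fun x => pvOut A s x * pvOut A s x)
def pvI2  (A : List (List Int)) (s : Finset Int) : Int := s.sum (fun y => pvIn A s y * pvIn A s y)
def pvIO  (A : List (List Int)) (s : Finset Int) : Int := s.sum (fun x => pvOut A s x * pvIn A s x)
def pvK   (A : List (List Int)) (s : Finset Int) : Int :=
  pvM A s * pvM A s - pvO2 A s - pvI2 A s + pvM A s - pvR A s

-- chain sum of edge indicators along a list (the permutation statistic f)
def pvAdj (A : List (List Int)) : List Int → Int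
  | [] => 0
  | [_] => 0
  | x :: y :: t => pvChi A x y + pvAdj A (y :: t)

def pvHeadW (w : Int → Int) : List Int → Int
  | [] => 0
  | h :: _ => w h

def pvPermsOf (l : List Int) : List (List Int) := PySem.List.permutations l l.length

-- ---- tiny facts about the indicator ----
lemma pvChi_self (A : List (List Int)) (a : Int) : pvChi A a a = 0 := by simp [pvChi]

lemma pvChi_sq (A : List (List Int)) (a b : Int) : pvChi A a b * pvChi A a b = pvChi A a b := by
  unfold pvChi; split_ifs <;> ring

lemma pvAdj_cons (A : List (List Int)) (x : Int) (q : List Int) :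
    pvAdj A (x :: q) = pvHeadW (pvChi A x) q + pvAdj A q := by
  cases q <;> simp [pvAdj, pvHeadW]

lemma pvHeadW_chi_sq (A : List (List Int)) (x : Int) (q : List Int) :
    pvHeadW (pvChi A x) q * pvHeadW (pvChi A x) q = pvHeadW (pvChi A x) q := by
  cases q <;> simp [pvHeadW, pvChi_sq]

-- ---- Finset algebra: how the statistics behave under deleting one vertex ----
lemma pvOut_erase (A : List (List Int)) {s : Finset Int} {u : Int} (hu : u ∈ s) (y : Int) :
    pvOut A (s.erase u) y = pvOut A s y - pvChi A y u := by
  simpa [pvOut] using Finset.sum_erase_eq_sub (f := fun z => pvChi A y z) hu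

lemma pvIn_erase (A : List (List Int)) {s : Finset Int} {u : Int} (hu : u ∈ s) (y : Int) :
    pvIn A (s.erase u) y = pvIn A s y - pvChi A u y := by
  simpa [pvIn] using Finset.sum_erase_eq_sub (f := fun z => pvChi A z y) hu

lemma pvSum_in (A : List (List Int)) (s : Finset Int) :
    s.sum (fun y => pvIn A s y) = pvM A s := by
  unfold pvIn pvM pvOut; exact Finset.sum_comm

lemma pvM_erase (A : List (List Int)) {s : Finset Int} {u : Int} (hu : u ∈ s) :
    pvM A (s.erase u) = pvM A s - pvOut A s u - pvIn A s u := by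
  unfold pvM
  rw [Finset.sum_congr rfl (fun x _ => pvOut_erase A hu x), Finset.sum_sub_distrib,
    Finset.sum_erase_eq_sub (f := fun x => pvOut A s x) hu,
    Finset.sum_erase_eq_sub (f := fun x => pvChi A x u) hu]
  have : s.sum (fun x => pvChi A x u) = pvIn A s u := rfl
  rw [this, pvChi_self]
  ring

lemma pvR_erase (A : List (List Int)) {s : Finset Int} {u : Int} (hu : u ∈ s) :
    pvR A (s.erase u)
      = pvR A s - 2 * s.sum (fun y => pvChi A u y * pvChi A y u) := by
  unfold pvR
  rw [Finset.sum_congr rfl (fun x _ =>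
    Finset.sum_erase_eq_sub (f := fun y => pvChi A x y * pvChi A y x) hu)]
  rw [Finset.sum_sub_distrib,
    Finset.sum_erase_eq_sub (f := fun x => s.sum (fun y => pvChi A x y * pvChi A y x)) hu,
    Finset.sum_erase_eq_sub (f := fun x => pvChi A x u * pvChi A u x) hu]
  have h1 : s.sum (fun x => pvChi A x u * pvChi A u x)
      = s.sum (fun y => pvChi A u y * pvChi A y u) := by
    exact Finset.sum_congr rfl (fun x _ => mul_comm _ _)
  rw [h1, pvChi_self]
  ring

lemma pvO2_erase (A : List (List Int)) {s : Finset Int} {u : Int} (hu : u ∈ s) :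
    pvO2 A (s.erase u)
      = pvO2 A s - 2 * s.sum (fun x => pvOut A s x * pvChi A x u) + pvIn A s u
          - pvOut A s u * pvOut A s u := by
  unfold pvO2
  rw [Finset.sum_congr rfl (fun x _ => by rw [pvOut_erase A hu x])]
  have hpt : ∀ x ∈ s, (pvOut A s x - pvChi A x u) * (pvOut A s x - pvChi A x u)
      = pvOut A s x * pvOut A s x - 2 * (pvOut A s x * pvChi A x u) + pvChi A x u := by
    intro x _
    have := pvChi_sq A x u
    nlinarith [this]
  rw [Finset.sum_erase_eq_sub
    (f := fun x => (pvOut A s x - pvChi A x u) * (pvOut A s x - pvChi A x u)) hu]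
  rw [Finset.sum_congr rfl hpt, Finset.sum_add_distrib, Finset.sum_sub_distrib]
  have h2 : s.sum (fun x => 2 * (pvOut A s x * pvChi A x u))
      = 2 * s.sum (fun x => pvOut A s x * pvChi A x u) := by rw [Finset.mul_sum]
  have h3 : s.sum (fun x => pvChi A x u) = pvIn A s u := rfl
  rw [h2, h3, pvChi_self]
  have : (fun x => pvOut A s x * pvOut A s x) = fun x => pvOut A s x * pvOut A s x := rfl
  ring

lemma pvI2_erase (A : List (List Int)) {s : Finset Int} {u : Int} (hu : u ∈ s) :
    pvI2 A (s.erase u)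
      = pvI2 A s - 2 * s.sum (fun y => pvIn A s y * pvChi A u y) + pvOut A s u
          - pvIn A s u * pvIn A s u := by
  unfold pvI2
  rw [Finset.sum_congr rfl (fun y _ => by rw [pvIn_erase A hu y])]
  have hpt : ∀ y ∈ s, (pvIn A s y - pvChi A u y) * (pvIn A s y - pvChi A u y)
      = pvIn A s y * pvIn A s y - 2 * (pvIn A s y * pvChi A u y) + pvChi A u y := by
    intro y _
    have := pvChi_sq A u y
    nlinarith [this]
  rw [Finset.sum_erase_eq_sub
    (f := fun y => (pvIn A s y - pvChi A u y) * (pvIn A s y - pvChi A u y)) hu]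
  rw [Finset.sum_congr rfl hpt, Finset.sum_add_distrib, Finset.sum_sub_distrib]
  have h2 : s.sum (fun y => 2 * (pvIn A s y * pvChi A u y))
      = 2 * s.sum (fun y => pvIn A s y * pvChi A u y) := by rw [Finset.mul_sum]
  have h3 : s.sum (fun y => pvChi A u y) = pvOut A s u := rfl
  rw [h2, h3, pvChi_self]
  ring

-- double sums that re-fold into the basic statistics
lemma pvSum_out_chi (A : List (List Int)) (s : Finset Int) :
    s.sum (fun u => s.sum (fun x => pvOut A s x * pvChi A x u)) = pvO2 A s := by
  rw [Finset.sum_comm]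
  exact Finset.sum_congr rfl (fun x _ => by rw [← Finset.mul_sum]; rfl)

lemma pvSum_in_chi (A : List (List Int)) (s : Finset Int) :
    s.sum (fun u => s.sum (fun y => pvIn A s y * pvChi A u y)) = pvI2 A s := by
  rw [Finset.sum_comm]
  exact Finset.sum_congr rfl (fun y _ => by
    rw [← Finset.mul_sum]
    have : s.sum (fun u => pvChi A u y) = pvIn A s y := rfl
    rw [this])

lemma pvSum_psi (A : List (List Int)) (s : Finset Int) :
    s.sum (fun u => s.sum (fun y => pvChi A u y * pvChi A y u)) = pvR A s := rfl

lemma pvSum_m_erase (A : List (List Int)) (s : Finset Int) :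
    s.sum (fun u => pvM A (s.erase u)) = (s.card : Int) * pvM A s - 2 * pvM A s := by
  rw [Finset.sum_congr rfl (fun u hu => pvM_erase A hu)]
  rw [Finset.sum_sub_distrib, Finset.sum_sub_distrib, Finset.sum_const, nsmul_eq_mul]
  have h1 : s.sum (fun u => pvOut A s u) = pvM A s := rfl
  rw [h1, pvSum_in]
  ring

lemma pvSum_m2_erase (A : List (List Int)) (s : Finset Int) :
    s.sum (fun u => pvM A (s.erase u) * pvM A (s.erase u))
      = (s.card : Int) * (pvM A s * pvM A s) - 4 * (pvM A s * pvM A s)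
        + pvO2 A s + pvI2 A s + 2 * pvIO A s := by
  have hpt : ∀ u ∈ s, pvM A (s.erase u) * pvM A (s.erase u)
      = pvM A s * pvM A s
        - 2 * (pvM A s * pvOut A s u) - 2 * (pvM A s * pvIn A s u)
        + pvOut A s u * pvOut A s u + pvIn A s u * pvIn A s u
        + 2 * (pvOut A s u * pvIn A s u) := by
    intro u hu
    rw [pvM_erase A hu]
    ring
  rw [Finset.sum_congr rfl hpt]
  simp only [Finset.sum_add_distrib, Finset.sum_sub_distrib, Finset.sum_const, nsmul_eq_mul,
    ← Finset.mul_sum]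
  have h1 : s.sum (fun u => pvOut A s u) = pvM A s := rfl
  have h2 : s.sum (fun u => pvOut A s u * pvOut A s u) = pvO2 A s := rfl
  have h3 : s.sum (fun u => pvIn A s u * pvIn A s u) = pvI2 A s := rfl
  have h4 : s.sum (fun u => pvOut A s u * pvIn A s u) = pvIO A s := rfl
  rw [h1, h2, h3, h4, pvSum_in]
  ring

lemma pvSum_o2_erase (A : List (List Int)) (s : Finset Int) :
    s.sum (fun u => pvO2 A (s.erase u))
      = (s.card : Int) * pvO2 A s - 3 * pvO2 A s + pvM A s := by
  rw [Finset.sum_congr rfl (fun u hu => pvO2_erase A hu)]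
  simp only [Finset.sum_add_distrib, Finset.sum_sub_distrib, Finset.sum_const, nsmul_eq_mul,
    ← Finset.mul_sum]
  rw [pvSum_out_chi, pvSum_in]
  have h2 : s.sum (fun u => pvOut A s u * pvOut A s u) = pvO2 A s := rfl
  rw [h2]
  ring

lemma pvSum_i2_erase (A : List (List Int)) (s : Finset Int) :
    s.sum (fun u => pvI2 A (s.erase u))
      = (s.card : Int) * pvI2 A s - 3 * pvI2 A s + pvM A s := by
  rw [Finset.sum_congr rfl (fun u hu => pvI2_erase A hu)]
  simp only [Finset.sum_add_distrib, Finset.sum_sub_distrib, Finset.sum_const, nsmul_eq_mul,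
    ← Finset.mul_sum]
  rw [pvSum_in_chi]
  have h1 : s.sum (fun u => pvOut A s u) = pvM A s := rfl
  have h3 : s.sum (fun u => pvIn A s u * pvIn A s u) = pvI2 A s := rfl
  rw [h1, h3]
  ring

lemma pvSum_r_erase (A : List (List Int)) (s : Finset Int) :
    s.sum (fun u => pvR A (s.erase u)) = (s.card : Int) * pvR A s - 2 * pvR A s := by
  rw [Finset.sum_congr rfl (fun u hu => pvR_erase A hu)]
  simp only [Finset.sum_sub_distrib, Finset.sum_const, nsmul_eq_mul, ← Finset.mul_sum]
  rw [pvSum_psi]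

lemma pvSum_k_erase (A : List (List Int)) (s : Finset Int) :
    s.sum (fun u => pvK A (s.erase u))
      = ((s.card : Int) - 4) * pvK A s + 2 * pvIO A s - 2 * pvR A s := by
  unfold pvK
  simp only [Finset.sum_add_distrib, Finset.sum_sub_distrib]
  rw [pvSum_m2_erase, pvSum_o2_erase, pvSum_i2_erase, pvSum_m_erase, pvSum_r_erase]
  ring

lemma pvSum_inc (A : List (List Int)) (s : Finset Int) :
    s.sum (fun u => (s.erase u).sum (fun y =>
        pvChi A u y * (pvM A ((s.erase u).erase y) + pvOut A (s.erase u) y)))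
      = pvM A s * pvM A s - pvO2 A s - pvI2 A s - pvIO A s + pvM A s := by
  have hpt : ∀ u ∈ s, (s.erase u).sum (fun y =>
        pvChi A u y * (pvM A ((s.erase u).erase y) + pvOut A (s.erase u) y))
      = pvM A s * pvOut A s u - pvOut A s u * pvOut A s u - pvOut A s u * pvIn A s u
        + pvOut A s u - s.sum (fun y => pvIn A s y * pvChi A u y) := by
    intro u hu
    have hinner : ∀ y ∈ s.erase u,
        pvChi A u y * (pvM A ((s.erase u).erase y) + pvOut A (s.erase u) y)
        = (pvM A s - pvOut A s u - pvIn A s u) * pvChi A u y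
            - pvIn A s y * pvChi A u y + pvChi A u y * pvChi A u y := by
      intro y hy
      rw [pvM_erase A hy, pvM_erase A hu, pvIn_erase A hu y]
      ring
    rw [Finset.sum_congr rfl hinner]
    rw [Finset.sum_erase_eq_sub (f := fun y =>
      (pvM A s - pvOut A s u - pvIn A s u) * pvChi A u y
        - pvIn A s y * pvChi A u y + pvChi A u y * pvChi A u y) hu]
    simp only [Finset.sum_add_distrib, Finset.sum_sub_distrib, ← Finset.mul_sum, pvChi_self,
      mul_zero, sub_zero, add_zero]
    rw [Finset.sum_congr rfl (fun y (_ : y ∈ s) => pvChi_sq A u y)]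
    have h1 : s.sum (fun y => pvChi A u y) = pvOut A s u := rfl
    rw [h1]
    ring
  rw [Finset.sum_congr rfl hpt]
  simp only [Finset.sum_add_distrib, Finset.sum_sub_distrib, ← Finset.mul_sum]
  rw [pvSum_in_chi]
  have h1 : s.sum (fun u => pvOut A s u) = pvM A s := rfl
  have h2 : s.sum (fun u => pvOut A s u * pvOut A s u) = pvO2 A s := rfl
  have h3 : s.sum (fun u => pvOut A s u * pvIn A s u) = pvIO A s := rfl
  rw [h1, h2, h3]
  ring

-- ---- the permutation generator: recursion and membership ----
lemma pvPerms_succ (xs : List Int) (r : Nat) :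
    PySem.List.permutations xs (r + 1) = (List.range xs.length).flatMap (fun i =>
      match xs[i]? with
      | none => []
      | some v => (PySem.List.permutations (xs.eraseIdx i) r).map (fun p => v :: p)) := by
  rw [PySem.List.permutations]
  congr 1
  funext i
  cases xs[i]? <;> rfl

lemma pvSum_map_flatMap {α β : Type} (L : List α) (g : α → List (List Int)) (F : List Int → β)
    [AddCommMonoid β] :
    ((L.flatMap g).map F).sum = (L.map (fun i => ((g i).map F).sum)).sum := by
  induction L with
  | nil => simp
  | cons x t ih => simp [List.flatMap_cons, ih]

lemma pvRange_sel_sum :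
    ∀ (l : List Int), l.Nodup → ∀ (G : Int → List Int → Int),
      ((List.range l.length).map (fun i =>
        match l[i]? with
        | none => (0 : Int)
        | some v => G v (l.eraseIdx i))).sum
      = (l.map (fun x => G x (l.erase x))).sum := by
  intro l
  induction l with
  | nil => intro _ G; simp
  | cons x t ih =>
    intro hnd G
    have hx : x ∉ t := (List.nodup_cons.mp hnd).1
    have hnt : t.Nodup := (List.nodup_cons.mp hnd).2
    rw [List.length_cons, List.range_succ_eq_map, List.map_cons, List.map_map, List.sum_cons]
    have htail : ((List.range t.length).map ((fun i =>
        match (x :: t)[i]? with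
        | none => (0 : Int)
        | some v => G v ((x :: t).eraseIdx i)) ∘ Nat.succ)).sum
        = ((List.range t.length).map (fun i =>
        match t[i]? with
        | none => (0 : Int)
        | some v => G v (x :: t.eraseIdx i))).sum := by
      apply congrArg
      apply List.map_congr_left
      intro i _
      simp only [Function.comp, List.getElem?_cons_succ, List.eraseIdx_cons_succ]
    rw [htail, ih hnt (fun v r => G v (x :: r))]
    rw [List.map_cons, List.sum_cons, List.erase_cons_head]
    have hrest : t.map (fun y => G y (x :: t.erase y))
        = t.map (fun y => G y ((x :: t).erase y)) := by
      apply List.map_congr_left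
      intro y hy
      have : y ≠ x := fun h => hx (h ▸ hy)
      rw [List.erase_cons_tail (by simpa using this.symm)]
    rw [hrest]
    rfl

lemma pvPerms_sum_erase (F : List Int → Int) {l : List Int} (hne : l ≠ []) (hnd : l.Nodup) :
    ((pvPermsOf l).map F).sum
      = (l.map (fun x => ((pvPermsOf (l.erase x)).map (fun q => F (x :: q))).sum)).sum := by
  cases l with
  | nil => exact absurd rfl hne
  | cons a t =>
    show ((PySem.List.permutations (a :: t) (t.length + 1)).map F).sum = _
    rw [pvPerms_succ, pvSum_map_flatMap]
    have hstep : ((List.range (a :: t).length).map (fun i =>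
        ((match (a :: t)[i]? with
          | none => ([] : List (List Int))
          | some v => (PySem.List.permutations ((a :: t).eraseIdx i) t.length).map
              (fun p => v :: p)).map F).sum)).sum
        = ((List.range (a :: t).length).map (fun i =>
        match (a :: t)[i]? with
        | none => (0 : Int)
        | some v => ((PySem.List.permutations ((a :: t).eraseIdx i) t.length).map
            (fun q => F (v :: q))).sum)).sum := by
      apply congrArg
      apply List.map_congr_left
      intro i _
      cases (a :: t)[i]? <;> simp [List.map_map, Function.comp_def]
    rw [hstep, pvRange_sel_sum (a :: t) hnd (fun v r => ((PySem.List.permutations r t.length).map (fun q => F (v :: q))).sum)]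
    apply congrArg
    apply List.map_congr_left
    intro x hx
    have hlen : ((a :: t).erase x).length = t.length := by
      rw [List.length_erase_of_mem hx]; rfl
    unfold pvPermsOf
    rw [hlen]

lemma pvMem_perm {l p : List Int} (hp : p ∈ pvPermsOf l) : p.Perm l :=
  PySem.List.perm_of_mem_permutations hp

lemma pvPerms_singleton (x : Int) : pvPermsOf [x] = [[x]] := by
  show PySem.List.permutations [x] 1 = [[x]]
  rw [PySem.List.permutations]
  simp [PySem.List.permutations]

lemma pvToFinset_erase {l : List Int} (hnd : l.Nodup) (a : Int) :
    (l.erase a).toFinset = l.toFinset.erase a := by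
  ext b
  simp only [List.mem_toFinset, hnd.mem_erase_iff, Finset.mem_erase]

lemma pvErase_sum_chi (A : List (List Int)) {l : List Int} (hnd : l.Nodup) {x : Int}
    (hx : x ∈ l) : ((l.erase x).map (pvChi A x)).sum = pvOut A l.toFinset x := by
  rw [← List.sum_toFinset _ (hnd.erase x), pvToFinset_erase hnd x]
  have : (l.toFinset.erase x).sum (pvChi A x) = pvOut A (l.toFinset.erase x) x := rfl
  rw [this, pvOut_erase A (List.mem_toFinset.mpr hx) x, pvChi_self, sub_zero]

-- ---- the three permutation sums ----
theorem pvPerms_const (l : List Int) (hnd : l.Nodup) (c : Int) :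
    ((pvPermsOf l).map (fun _ => c)).sum = (l.length.factorial : Int) * c := by
  rcases eq_or_ne l [] with rfl | hne
  · show ((PySem.List.permutations [] 0).map _).sum = _
    simp [PySem.List.permutations]
  · rw [pvPerms_sum_erase _ hne hnd]
    have hx : ∀ x ∈ l, ((pvPermsOf (l.erase x)).map (fun _ => c)).sum
        = ((l.length - 1).factorial : Int) * c := by
      intro x hxm
      rw [pvPerms_const (l.erase x) (hnd.erase x) c, List.length_erase_of_mem hxm]
    rw [List.map_congr_left hx, PySem.List.sum_map_const_int]
    cases l with
    | nil => exact absurd rfl hne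
    | cons a t =>
      push_cast [List.length_cons, Nat.add_sub_cancel, Nat.factorial_succ]
      ring
termination_by l.length
decreasing_by
  have h := List.length_pos_of_mem hxm
  rw [List.length_erase_of_mem hxm]
  omega

theorem pvPerms_headW (w : Int → Int) (l : List Int) (hnd : l.Nodup) :
    ((pvPermsOf l).map (pvHeadW w)).sum
      = ((l.length - 1).factorial : Int) * (l.map w).sum := by
  rcases eq_or_ne l [] with rfl | hne
  · show ((PySem.List.permutations [] 0).map _).sum = _
    simp [PySem.List.permutations, pvHeadW]
  · rw [pvPerms_sum_erase (pvHeadW w) hne hnd]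
    have hx : ∀ x ∈ l, ((pvPermsOf (l.erase x)).map (fun q => pvHeadW w (x :: q))).sum
        = ((l.length - 1).factorial : Int) * w x := by
      intro x hxm
      have h1 : (fun q : List Int => pvHeadW w (x :: q)) = (fun _ : List Int => w x) := rfl
      rw [h1, pvPerms_const (l.erase x) (hnd.erase x) (w x), List.length_erase_of_mem hxm]
    rw [List.map_congr_left hx, List.sum_map_mul_left]


theorem pvPerms_adj (A : List (List Int)) (l : List Int) (hnd : l.Nodup) :
    ((pvPermsOf l).map (pvAdj A)).sum
      = ((l.length - 1).factorial : Int) * pvM A l.toFinset := by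
  match l, hnd with
  | [], _ =>
    show ((PySem.List.permutations [] 0).map _).sum = _
    simp [PySem.List.permutations, pvAdj, pvM]
  | [x], _ =>
    rw [pvPerms_singleton]
    simp [pvAdj, pvM, pvOut, pvChi_self]
  | x :: y :: t, hnd =>
    have hne : x :: y :: t ≠ [] := by simp
    rw [pvPerms_sum_erase (pvAdj A) hne hnd]
    have hx : ∀ z ∈ x :: y :: t,
        ((pvPermsOf ((x :: y :: t).erase z)).map (fun q => pvAdj A (z :: q))).sum
        = (t.length.factorial : Int)
            * (pvOut A (x :: y :: t).toFinset z
                + pvM A ((x :: y :: t).toFinset.erase z)) := by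
      intro z hzm
      have h1 : (fun q : List Int => pvAdj A (z :: q))
          = fun q => pvHeadW (pvChi A z) q + pvAdj A q := funext (pvAdj_cons A z)
      rw [h1, PySem.List.sum_map_add_int,
        pvPerms_headW (pvChi A z) _ (hnd.erase z), pvPerms_adj A _ (hnd.erase z),
        List.length_erase_of_mem hzm, pvErase_sum_chi A hnd hzm,
        pvToFinset_erase hnd z]
      have hlen : (x :: y :: t).length - 1 - 1 = t.length := by simp
      rw [hlen]
      ring
    rw [List.map_congr_left hx]
    rw [← List.sum_toFinset _ hnd, ← Finset.mul_sum, Finset.sum_add_distrib,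
      pvSum_m_erase]
    have h2 : (x :: y :: t).toFinset.sum (fun z => pvOut A (x :: y :: t).toFinset z)
        = pvM A (x :: y :: t).toFinset := rfl
    rw [h2, List.toFinset_card_of_nodup hnd]
    have hlen1 : (x :: y :: t).length - 1 = t.length + 1 := by simp
    have hlen2 : (x :: y :: t).length = t.length + 2 := by simp
    rw [hlen1, hlen2]
    push_cast [Nat.factorial_succ]
    ring
termination_by l.length
decreasing_by
  have h := List.length_pos_of_mem hzm
  rw [List.length_erase_of_mem hzm]
  omega

theorem pvPerms_headW_adj (A : List (List Int)) (w : Int → Int) (l : List Int) (hnd : l.Nodup) :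
    ((pvPermsOf l).map (fun p => pvHeadW w p * pvAdj A p)).sum
      = ((l.length - 2).factorial : Int)
          * (l.map (fun y => w y * (pvM A (l.toFinset.erase y) + pvOut A l.toFinset y))).sum := by
  rcases eq_or_ne l [] with rfl | hne
  · show ((PySem.List.permutations [] 0).map _).sum = _
    simp [PySem.List.permutations, pvHeadW]
  · rw [pvPerms_sum_erase _ hne hnd]
    have hx : ∀ x ∈ l,
        ((pvPermsOf (l.erase x)).map (fun q => pvHeadW w (x :: q) * pvAdj A (x :: q))).sum
        = ((l.length - 2).factorial : Int)
            * (w x * (pvM A (l.toFinset.erase x) + pvOut A l.toFinset x)) := by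
      intro x hxm
      have h1 : (fun q : List Int => pvHeadW w (x :: q) * pvAdj A (x :: q))
          = fun q => w x * pvHeadW (pvChi A x) q + w x * pvAdj A q :=
        funext fun q => by rw [pvAdj_cons]; show w x * _ = _; ring
      rw [h1, PySem.List.sum_map_add_int, List.sum_map_mul_left, List.sum_map_mul_left,
        pvPerms_headW (pvChi A x) _ (hnd.erase x), pvPerms_adj A _ (hnd.erase x),
        List.length_erase_of_mem hxm, pvErase_sum_chi A hnd hxm, pvToFinset_erase hnd x]
      have hlen : l.length - 1 - 1 = l.length - 2 := by omega
      rw [hlen]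
      ring
    rw [List.map_congr_left hx, List.sum_map_mul_left]

lemma pvK_empty (A : List (List Int)) : pvK A (∅ : Finset Int) = 0 := by
  simp [pvK, pvM, pvO2, pvI2, pvR]

lemma pvK_singleton (A : List (List Int)) (x : Int) : pvK A ({x} : Finset Int) = 0 := by
  simp [pvK, pvM, pvO2, pvI2, pvR, pvOut, pvIn, pvChi_self]

theorem pvPerms_adj_sq (A : List (List Int)) (l : List Int) (hnd : l.Nodup) :
    ((pvPermsOf l).map (fun p => pvAdj A p * pvAdj A p)).sum
      = ((l.length - 1).factorial : Int) * pvM A l.toFinset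
        + ((l.length - 2).factorial : Int) * pvK A l.toFinset := by
  match l, hnd with
  | [], _ =>
    show ((PySem.List.permutations [] 0).map _).sum = _
    simp [PySem.List.permutations, pvAdj, pvM, pvK_empty]
  | [x], _ =>
    rw [pvPerms_singleton]
    simp [pvAdj, pvM, pvOut, pvChi_self, pvK_singleton]
  | [a, b], hnd =>
    have hab : a ≠ b := by
      rintro rfl
      simp at hnd
    have hne : ([a, b] : List Int) ≠ [] := by simp
    rw [pvPerms_sum_erase _ hne hnd]
    have e1 : ([a, b] : List Int).erase a = [b] := by simp
    have e2 : ([a, b] : List Int).erase b = [a] := by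
      rw [List.erase_cons_tail (by simpa using hab), List.erase_cons_head]
    rw [List.map_cons, List.map_cons, List.map_nil, e1, e2, pvPerms_singleton,
      pvPerms_singleton]
    simp only [List.map_cons, List.map_nil, List.sum_cons, List.sum_nil]
    have hA1 : pvAdj A [a, b] = pvChi A a b := by simp [pvAdj]
    have hA2 : pvAdj A [b, a] = pvChi A b a := by simp [pvAdj]
    rw [hA1, hA2]
    have hsets : ([a, b] : List Int).toFinset = insert a ({b} : Finset Int) := by simp
    have hnotm : a ∉ ({b} : Finset Int) := by simpa using hab
    have hp := pvChi_sq A a b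
    have hq := pvChi_sq A b a
    have hlen : (([a, b] : List Int).length - 1) = 1 := rfl
    have hlen2 : (([a, b] : List Int).length - 2) = 0 := rfl
    rw [hsets, hlen, hlen2]
    simp only [pvK, pvM, pvO2, pvI2, pvR, pvOut, pvIn, Finset.sum_insert hnotm,
      Finset.sum_singleton, pvChi_self, Nat.factorial]
    push_cast
    linear_combination 2 * hp + 2 * hq
  | x :: y :: z :: t, hnd =>
    have hne : x :: y :: z :: t ≠ [] := by simp
    rw [pvPerms_sum_erase (fun p => pvAdj A p * pvAdj A p) hne hnd]
    set l := x :: y :: z :: t with hl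
    have hx : ∀ u ∈ l,
        ((pvPermsOf (l.erase u)).map (fun q => pvAdj A (u :: q) * pvAdj A (u :: q))).sum
        = ((t.length + 1).factorial : Int) * (pvM A (l.toFinset.erase u) + pvOut A l.toFinset u)
          + (t.length.factorial : Int) * (pvK A (l.toFinset.erase u)
              + 2 * (l.toFinset.erase u).sum (fun w =>
                  pvChi A u w * (pvM A ((l.toFinset.erase u).erase w)
                    + pvOut A (l.toFinset.erase u) w))) := by
      intro u hum
      have h1 : (fun q : List Int => pvAdj A (u :: q) * pvAdj A (u :: q))
          = fun q => pvAdj A q * pvAdj A q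
              + 2 * (pvHeadW (pvChi A u) q * pvAdj A q) + pvHeadW (pvChi A u) q :=
        funext fun q => by
          rw [pvAdj_cons]
          have := pvHeadW_chi_sq A u q
          nlinarith [this]
      rw [h1]
      rw [PySem.List.sum_map_add_int, PySem.List.sum_map_add_int, List.sum_map_mul_left,
        pvPerms_adj_sq A _ (hnd.erase u), pvPerms_headW_adj A (pvChi A u) _ (hnd.erase u),
        pvPerms_headW (pvChi A u) _ (hnd.erase u),
        List.length_erase_of_mem hum, pvErase_sum_chi A hnd hum]
      have hlen1 : l.length - 1 - 1 = t.length + 1 := by simp [hl]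
      have hlen2 : l.length - 1 - 2 = t.length := by simp [hl]
      rw [hlen1, hlen2]
      rw [← List.sum_toFinset _ (hnd.erase u), pvToFinset_erase hnd u]
      ring
    rw [List.map_congr_left hx]
    rw [← List.sum_toFinset _ hnd]
    simp only [Finset.sum_add_distrib, ← Finset.mul_sum]
    rw [pvSum_m_erase, pvSum_k_erase, pvSum_inc]
    have h2 : l.toFinset.sum (fun z => pvOut A l.toFinset z) = pvM A l.toFinset := rfl
    rw [h2, List.toFinset_card_of_nodup hnd]
    have hlen3 : l.length - 1 = t.length + 2 := by simp [hl]
    have hlen4 : l.length - 2 = t.length + 1 := by simp [hl]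
    have hlen5 : l.length = t.length + 3 := by simp [hl]
    rw [hlen3, hlen4, hlen5]
    unfold pvK
    push_cast [Nat.factorial_succ]
    ring
termination_by l.length
decreasing_by
  all_goals {
    have h := List.length_pos_of_mem hum
    rw [List.length_erase_of_mem hum]
    simp only [hl]
    simp }

-- ---- bridging A's indexed f to the chain sum ----
lemma pvChi_of_ne (A : List (List Int)) {x y : Int} (h : x ≠ y) :
    (if pvEnt A x y = 1 then (1 : Int) else 0) = pvChi A x y := by
  simp [pvChi, h]

lemma pvF_bridge (A : List (List Int)) : ∀ (p : List Int), p.Nodup →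
    ((PySem.List.pyRange 0 ((p.length : Int) - 1) 1).map (fun i =>
      if pvEnt A (PySem.List.pyGetD p i 0) (PySem.List.pyGetD p (i + 1) 0) = 1
      then (1 : Int) else 0)).sum = pvAdj A p := by
  intro p
  match p with
  | [] =>
    intro _
    rw [PySem.List.pyRange_one_eq_nil (by norm_num)]
    rfl
  | [x] =>
    intro _
    rw [PySem.List.pyRange_one_eq_nil (by norm_num)]
    rfl
  | x :: y :: t =>
    intro hnd
    have hxy : x ≠ y := by
      rintro rfl
      simp at hnd
    have hlen : ((x :: y :: t).length : Int) - 1 = ((t.length + 1 : Nat) : Int) := by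
      push_cast
      simp
    rw [hlen, PySem.List.pyRange_zero_nat, List.map_map, List.range_succ_eq_map,
      List.map_cons, List.sum_cons, List.map_map]
    have hhead : (((fun i : Int =>
        if pvEnt A (PySem.List.pyGetD (x :: y :: t) i 0)
            (PySem.List.pyGetD (x :: y :: t) (i + 1) 0) = 1
        then (1 : Int) else 0) ∘ fun k : Nat => (k : Int)) 0) = pvChi A x y := by
      show (if pvEnt A (PySem.List.pyGetD (x :: y :: t) ((0 : Nat) : Int) 0)
          (PySem.List.pyGetD (x :: y :: t) (((0 : Nat) : Int) + 1) 0) = 1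
          then (1 : Int) else 0) = _
      have h1 : ((0 : Nat) : Int) + 1 = ((1 : Nat) : Int) := by norm_num
      rw [h1, PySem.List.pyGetD_natCast, PySem.List.pyGetD_natCast]
      exact pvChi_of_ne A hxy
    rw [hhead]
    have htail : ((List.range t.length).map (((fun i : Int =>
        if pvEnt A (PySem.List.pyGetD (x :: y :: t) i 0)
            (PySem.List.pyGetD (x :: y :: t) (i + 1) 0) = 1
        then (1 : Int) else 0) ∘ fun k : Nat => (k : Int)) ∘ Nat.succ)).sum
        = ((PySem.List.pyRange 0 (((y :: t).length : Int) - 1) 1).map (fun i =>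
          if pvEnt A (PySem.List.pyGetD (y :: t) i 0)
              (PySem.List.pyGetD (y :: t) (i + 1) 0) = 1
          then (1 : Int) else 0)).sum := by
      have hlen2 : (((y :: t).length : Int)) - 1 = ((t.length : Nat) : Int) := by
        simp
      rw [hlen2, PySem.List.pyRange_zero_nat, List.map_map]
      apply congrArg
      apply List.map_congr_left
      intro i _
      show (if pvEnt A (PySem.List.pyGetD (x :: y :: t) ((i + 1 : Nat) : Int) 0)
          (PySem.List.pyGetD (x :: y :: t) (((i + 1 : Nat) : Int) + 1) 0) = 1
          then (1 : Int) else 0) = _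
      have h2 : (((i + 1 : Nat) : Int)) + 1 = ((i + 2 : Nat) : Int) := by push_cast; ring
      have h3 : ((i : Nat) : Int) + 1 = ((i + 1 : Nat) : Int) := by push_cast; ring
      show _ = (if pvEnt A (PySem.List.pyGetD (y :: t) ((i : Nat) : Int) 0)
          (PySem.List.pyGetD (y :: t) (((i : Nat) : Int) + 1) 0) = 1 then (1 : Int) else 0)
      rw [h2, h3]
      simp only [PySem.List.pyGetD_natCast]
      rfl
    rw [htail, pvF_bridge A (y :: t) (List.nodup_cons.mp hnd).2, pvAdj]

lemma pvF_eq_adj (A : List (List Int)) (p : List Int) (hnd : p.Nodup)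
    (hl : p.length = A.length) : pvF A p = pvAdj A p := by
  unfold pvF
  rw [← hl]
  exact pvF_bridge A p hnd

lemma pvSum_map_mul_sub (c : Int) (L : List (List Int)) (g : List Int → Int) :
    (L.map (fun p => g p * (c - g p))).sum
      = c * (L.map g).sum - (L.map (fun p => g p * g p)).sum := by
  induction L with
  | nil => simp
  | cons a t ih => simp [ih]; ring

-- ---- evaluation of the two ports ----
lemma pvL_length (A : List (List Int)) :
    (PySem.List.pyRange 0 (A.length : Int) 1).length = A.length := by
  rw [PySem.List.length_pyRange_one]
  simp

lemma pvA_val (A : List (List Int)) :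
    compute_sum_fb A
      = ((A.length : Int) - 1)
          * (((A.length - 1).factorial : Int) * pvM A (PySem.List.pyRange 0 (A.length : Int) 1).toFinset)
        - (((A.length - 1).factorial : Int) * pvM A (PySem.List.pyRange 0 (A.length : Int) 1).toFinset
            + ((A.length - 2).factorial : Int) * pvK A (PySem.List.pyRange 0 (A.length : Int) 1).toFinset) := by
  have hnodup := PySem.List.nodup_pyRange_one 0 (A.length : Int)
  have hL := pvL_length A
  have h1 : compute_sum_fb A
      = ((pvPermsOf (PySem.List.pyRange 0 (A.length : Int) 1)).map
          (fun p => pvF A p * ((A.length : Int) - 1 - pvF A p))).sum := by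
    unfold compute_sum_fb pvPermsOf
    rw [PySem.List.foldl_add _ (fun p => pvF A p * ((A.length : Int) - 1 - pvF A p)) 0,
      zero_add]
  rw [h1]
  have h2 : ∀ p ∈ pvPermsOf (PySem.List.pyRange 0 (A.length : Int) 1),
      pvF A p * ((A.length : Int) - 1 - pvF A p)
        = pvAdj A p * (((A.length : Int) - 1) - pvAdj A p) := by
    intro p hp
    have hperm := pvMem_perm hp
    have hpnd : p.Nodup := hperm.nodup_iff.mpr hnodup
    have hplen : p.length = A.length := by rw [hperm.length_eq, hL]
    rw [pvF_eq_adj A p hpnd hplen]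
  rw [List.map_congr_left h2,
    pvSum_map_mul_sub ((A.length : Int) - 1) _ (pvAdj A),
    pvPerms_adj A _ hnodup, pvPerms_adj_sq A _ hnodup, hL]

lemma pvEdge_eq (A : List (List Int)) (i j : Nat) :
    pvEdge A i j = pvChi A (i : Int) (j : Int) := by
  simp [pvEdge, pvChi, Ne]

lemma pvRangeSum (n : Nat) (g : Int → Int) :
    ((List.range n).map (fun i : Nat => g (i : Int))).sum
      = ((PySem.List.pyRange 0 (n : Int) 1).toFinset).sum g := by
  rw [PySem.List.pyRange_zero_nat,
    List.sum_toFinset _ ((List.nodup_range).map (fun a b => by exact_mod_cast id)),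
    List.map_map]
  rfl

lemma pvFoldFact : ∀ (m : Nat),
    ((PySem.List.pyRange 2 (m : Int) 1).foldl (fun a t => a * t) 1)
      = ((m - 1).factorial : Int) := by
  intro m
  induction m with
  | zero => rw [PySem.List.pyRange_one_eq_nil (by norm_num)]; rfl
  | succ m ih =>
    by_cases hm : m < 2
    · interval_cases m
      · rw [PySem.List.pyRange_one_eq_nil (by norm_num)]; rfl
      · rw [PySem.List.pyRange_one_eq_nil (by norm_num)]; rfl
    · push_neg at hm
      have hcast : ((m + 1 : Nat) : Int) = (m : Int) + 1 := by push_cast; ring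
      rw [hcast, PySem.List.pyRange_one_succ_right (by exact_mod_cast hm),
        List.foldl_append, ih]
      obtain ⟨k, rfl⟩ : ∃ k, m = k + 2 := ⟨m - 2, by omega⟩
      show ((k + 1).factorial : Int) * ((k + 2 : Nat) : Int) = ((k + 2).factorial : Int)
      push_cast [Nat.factorial_succ (k + 1)]
      ring

lemma pvD_val (A : List (List Int)) (s : Finset Int) :
    s.sum (fun u => s.sum (fun v => pvChi A u v
        * (pvM A s - pvOut A s u - pvIn A s u - pvOut A s v - pvIn A s v + 1 + pvChi A v u)))
      = pvM A s * pvM A s - pvO2 A s - pvI2 A s - 2 * pvIO A s + pvM A s + pvR A s := by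
  have hpt : ∀ u ∈ s, s.sum (fun v => pvChi A u v
        * (pvM A s - pvOut A s u - pvIn A s u - pvOut A s v - pvIn A s v + 1 + pvChi A v u))
      = (pvM A s - pvOut A s u - pvIn A s u) * pvOut A s u
        - s.sum (fun v => pvOut A s v * pvChi A u v)
        - s.sum (fun v => pvIn A s v * pvChi A u v)
        + pvOut A s u
        + s.sum (fun v => pvChi A u v * pvChi A v u) := by
    intro u _
    have hexp : ∀ v ∈ s, pvChi A u v
        * (pvM A s - pvOut A s u - pvIn A s u - pvOut A s v - pvIn A s v + 1 + pvChi A v u)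
        = (pvM A s - pvOut A s u - pvIn A s u) * pvChi A u v
          - pvOut A s v * pvChi A u v - pvIn A s v * pvChi A u v
          + pvChi A u v + pvChi A u v * pvChi A v u := fun v _ => by ring
    rw [Finset.sum_congr rfl hexp]
    simp only [Finset.sum_add_distrib, Finset.sum_sub_distrib, ← Finset.mul_sum]
    have h1 : s.sum (fun v => pvChi A u v) = pvOut A s u := rfl
    rw [h1]
  rw [Finset.sum_congr rfl hpt]
  simp only [Finset.sum_add_distrib, Finset.sum_sub_distrib]
  have hA : s.sum (fun u => s.sum (fun v => pvOut A s v * pvChi A u v))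
      = s.sum (fun v => pvOut A s v * pvIn A s v) := by
    rw [Finset.sum_comm]
    exact Finset.sum_congr rfl (fun v _ => by rw [← Finset.mul_sum]; rfl)
  have hB : s.sum (fun u => s.sum (fun v => pvIn A s v * pvChi A u v)) = pvI2 A s := by
    rw [Finset.sum_comm]
    exact Finset.sum_congr rfl (fun v _ => by rw [← Finset.mul_sum]; rfl)
  rw [hA, hB, pvSum_psi]
  have hC : s.sum (fun u => (pvM A s - pvOut A s u - pvIn A s u) * pvOut A s u)
      = pvM A s * pvM A s - pvO2 A s - s.sum (fun u => pvIn A s u * pvOut A s u) := by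
    have : ∀ u ∈ s, (pvM A s - pvOut A s u - pvIn A s u) * pvOut A s u
        = pvM A s * pvOut A s u - pvOut A s u * pvOut A s u - pvIn A s u * pvOut A s u :=
      fun u _ => by ring
    rw [Finset.sum_congr rfl this]
    simp only [Finset.sum_sub_distrib, ← Finset.mul_sum]
    rfl
  rw [hC]
  have hD : s.sum (fun u => pvIn A s u * pvOut A s u) = pvIO A s :=
    Finset.sum_congr rfl (fun u _ => mul_comm _ _)
  have hE : s.sum (fun v => pvOut A s v * pvIn A s v) = pvIO A s := rfl
  have hF : s.sum (fun u => pvOut A s u) = pvM A s := rfl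
  rw [hD, hE, hF]
  ring

lemma pvB_val (A : List (List Int)) (h : 2 ≤ A.length) :
    compute_sum_fb_alt A
      = ((A.length : Int) - 2) * ((A.length - 2).factorial : Int) * ((A.length : Int) - 1)
          * pvM A (PySem.List.pyRange 0 (A.length : Int) 1).toFinset
        - ((A.length - 2).factorial : Int) * pvK A (PySem.List.pyRange 0 (A.length : Int) 1).toFinset := by
  have hlt : ¬ (A.length < 2) := by omega
  simp only [compute_sum_fb_alt, if_neg hlt]
  simp only [pvEdge_eq]
  have hout : ∀ i : Nat, ((List.range A.length).map (fun j : Nat => pvChi A (i : Int) (j : Int))).sum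
      = pvOut A (PySem.List.pyRange 0 (A.length : Int) 1).toFinset (i : Int) :=
    fun i => pvRangeSum A.length (fun z => pvChi A (i : Int) z)
  have hin : ∀ j : Nat, ((List.range A.length).map (fun i : Nat => pvChi A (i : Int) (j : Int))).sum
      = pvIn A (PySem.List.pyRange 0 (A.length : Int) 1).toFinset (j : Int) :=
    fun j => pvRangeSum A.length (fun z => pvChi A z (j : Int))
  simp only [hout, hin]
  have hm : ((List.range A.length).map (fun i : Nat =>
      pvOut A (PySem.List.pyRange 0 (A.length : Int) 1).toFinset (i : Int))).sum
      = pvM A (PySem.List.pyRange 0 (A.length : Int) 1).toFinset := by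
    rw [pvRangeSum A.length (pvOut A (PySem.List.pyRange 0 (A.length : Int) 1).toFinset)]
    rfl
  simp only [hm]
  have hr : ((List.range A.length).map (fun i : Nat => ((List.range A.length).map
      (fun j : Nat => pvChi A (i : Int) (j : Int) * pvChi A (j : Int) (i : Int))).sum)).sum
      = pvR A (PySem.List.pyRange 0 (A.length : Int) 1).toFinset := by
    have hi : ∀ i : Nat, ((List.range A.length).map
        (fun j : Nat => pvChi A (i : Int) (j : Int) * pvChi A (j : Int) (i : Int))).sum
        = (PySem.List.pyRange 0 (A.length : Int) 1).toFinset.sum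
            (fun z => pvChi A (i : Int) z * pvChi A z (i : Int)) :=
      fun i => pvRangeSum A.length (fun z => pvChi A (i : Int) z * pvChi A z (i : Int))
    simp only [hi]
    rw [pvRangeSum A.length (fun u => (PySem.List.pyRange 0 (A.length : Int) 1).toFinset.sum
      (fun z => pvChi A u z * pvChi A z u))]
    rfl
  simp only [hr]
  have hgout : ∀ v ∈ List.range A.length, ((List.range A.length).map (fun i : Nat =>
      pvOut A (PySem.List.pyRange 0 (A.length : Int) 1).toFinset (i : Int))).getD v 0
      = pvOut A (PySem.List.pyRange 0 (A.length : Int) 1).toFinset (v : Int) :=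
    fun v hv => PySem.List.getD_map_range _ _ _ _ (List.mem_range.mp hv)
  have hgin : ∀ v ∈ List.range A.length, ((List.range A.length).map (fun j : Nat =>
      pvIn A (PySem.List.pyRange 0 (A.length : Int) 1).toFinset (j : Int))).getD v 0
      = pvIn A (PySem.List.pyRange 0 (A.length : Int) 1).toFinset (v : Int) :=
    fun v hv => PySem.List.getD_map_range _ _ _ _ (List.mem_range.mp hv)
  have hc : ((List.range A.length).map (fun v => ((List.range A.length).map (fun j : Nat =>
      pvIn A (PySem.List.pyRange 0 (A.length : Int) 1).toFinset (j : Int))).getD v 0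
      * ((List.range A.length).map (fun i : Nat =>
      pvOut A (PySem.List.pyRange 0 (A.length : Int) 1).toFinset (i : Int))).getD v 0)).sum
      = pvIO A (PySem.List.pyRange 0 (A.length : Int) 1).toFinset := by
    rw [List.map_congr_left (fun v hv => by rw [hgin v hv, hgout v hv])]
    rw [pvRangeSum A.length (fun u =>
      pvIn A (PySem.List.pyRange 0 (A.length : Int) 1).toFinset u
        * pvOut A (PySem.List.pyRange 0 (A.length : Int) 1).toFinset u)]
    exact Finset.sum_congr rfl (fun u _ => mul_comm _ _)
  rw [hc]
  have hdlist : ∀ i ∈ List.range A.length, ((List.range A.length).map (fun (j : Nat) =>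
        pvChi A (i : Int) (j : Int)
          * (pvM A (PySem.List.pyRange 0 (A.length : Int) 1).toFinset
            - ((List.range A.length).map (fun i : Nat =>
                pvOut A (PySem.List.pyRange 0 (A.length : Int) 1).toFinset (i : Int))).getD i 0
            - ((List.range A.length).map (fun j : Nat =>
                pvIn A (PySem.List.pyRange 0 (A.length : Int) 1).toFinset (j : Int))).getD i 0
            - ((List.range A.length).map (fun i : Nat =>
                pvOut A (PySem.List.pyRange 0 (A.length : Int) 1).toFinset (i : Int))).getD j 0
            - ((List.range A.length).map (fun j : Nat =>
                pvIn A (PySem.List.pyRange 0 (A.length : Int) 1).toFinset (j : Int))).getD j 0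
            + 1 + pvChi A (j : Int) (i : Int)))).sum
      = (PySem.List.pyRange 0 (A.length : Int) 1).toFinset.sum (fun z =>
          pvChi A (i : Int) z
            * (pvM A (PySem.List.pyRange 0 (A.length : Int) 1).toFinset
              - pvOut A (PySem.List.pyRange 0 (A.length : Int) 1).toFinset (i : Int)
              - pvIn A (PySem.List.pyRange 0 (A.length : Int) 1).toFinset (i : Int)
              - pvOut A (PySem.List.pyRange 0 (A.length : Int) 1).toFinset z
              - pvIn A (PySem.List.pyRange 0 (A.length : Int) 1).toFinset z
              + 1 + pvChi A z (i : Int))) := by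
    intro i hi
    rw [List.map_congr_left (fun j hj => by rw [hgout i hi, hgin i hi, hgout j hj, hgin j hj])]
    exact pvRangeSum A.length (fun z => pvChi A (i : Int) z
      * (pvM A (PySem.List.pyRange 0 (A.length : Int) 1).toFinset
        - pvOut A (PySem.List.pyRange 0 (A.length : Int) 1).toFinset (i : Int)
        - pvIn A (PySem.List.pyRange 0 (A.length : Int) 1).toFinset (i : Int)
        - pvOut A (PySem.List.pyRange 0 (A.length : Int) 1).toFinset z
        - pvIn A (PySem.List.pyRange 0 (A.length : Int) 1).toFinset z
        + 1 + pvChi A z (i : Int)))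
  rw [List.map_congr_left hdlist]
  rw [pvRangeSum A.length (fun u => (PySem.List.pyRange 0 (A.length : Int) 1).toFinset.sum
      (fun z => pvChi A u z
        * (pvM A (PySem.List.pyRange 0 (A.length : Int) 1).toFinset
          - pvOut A (PySem.List.pyRange 0 (A.length : Int) 1).toFinset u
          - pvIn A (PySem.List.pyRange 0 (A.length : Int) 1).toFinset u
          - pvOut A (PySem.List.pyRange 0 (A.length : Int) 1).toFinset z
          - pvIn A (PySem.List.pyRange 0 (A.length : Int) 1).toFinset z
          + 1 + pvChi A z u)))]
  rw [pvD_val]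
  have hf2 : (PySem.List.pyRange 2 ((A.length : Int) - 1) 1).foldl (fun a t => a * t) 1
      = ((A.length - 2).factorial : Int) := by
    have h1 : ((A.length : Int) - 1) = ((A.length - 1 : Nat) : Int) := by omega
    have h2 : A.length - 1 - 1 = A.length - 2 := by omega
    rw [h1, pvFoldFact, h2]
  rw [hf2]
  unfold pvK
  ring

-- ===== VERDICT (by name: the statement is the Claim_ definition above) =====
theorem compute_sum_fb_spec : Claim_equal_compute_sum_fb := by
  intro A _hdom _hpre
  unfold Spec_compute_sum_fb
  by_cases h2 : 2 ≤ A.length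
  · rw [pvA_val, pvB_val A h2]
    obtain ⟨k, hk⟩ : ∃ k, A.length = k + 2 := ⟨A.length - 2, by omega⟩
    rw [hk]
    have h3 : k + 2 - 1 = k + 1 := rfl
    have h4 : k + 2 - 2 = k := rfl
    rw [h3, h4]
    push_cast [Nat.factorial_succ]
    ring
  · push_neg at h2
    match A, h2 with
    | [], _ => decide
    | [row], _ =>
      have hB : compute_sum_fb_alt [row] = 0 := by
        unfold compute_sum_fb_alt
        norm_num
      rw [hB]
      unfold compute_sum_fb
      have e1 : PySem.List.pyRange 0 ((([row] : List (List Int)).length : Int)) 1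
          = [(0 : Int)] := by
        show PySem.List.pyRange 0 ((1 : Nat) : Int) 1 = [(0 : Int)]
        decide
      rw [e1]
      have e2 : PySem.List.permutations [(0 : Int)] ([(0 : Int)].length) = [[(0 : Int)]] :=
        pvPerms_singleton 0
      rw [e2]
      have e3 : pvF [row] [(0 : Int)] = 0 := by
        unfold pvF
        rw [PySem.List.pyRange_one_eq_nil (by norm_num)]
        rfl
      simp [e3]
    | _ :: _ :: _, hh => simp at hh
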